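-- pv_equiv track=rewrite | github.com/Ghaith-amdouni/MOJO-JOJO-CTF | misc/inferno/generate_ws.py | to_ws_int
-- ===== SOURCE A (Python) =====
-- def to_ws_int(n):
--     if n == 0: return "S\n"
--     s = ""
--     prefix = "S" if n > 0 else "T"
--     n = abs(n)
--     while n > 0:
--         s = ("S" if n % 2 == 0 else "T") + s
--         n //= 2
--     return prefix + s + "\n"
-- ===== SOURCE B (Python) =====
-- def to_ws_int(n):
--     if n == 0:
--         return "S\n"
--     prefix = "S" if n > 0 else "T"
--     body = bin(abs(n))[2:].translate(str.maketrans("01", "ST"))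
--     return prefix + body + "\n"
-- ===== Notes on version B (the rewrite author's own statement) =====
-- stated objective: idiomatic
-- what changed: Replaces the manual divide-by-2 loop that prepends 'S'/'T' characters with Python's built-in bin() radix conversion followed by a character translation ('1'->'T','0'->'S')
import Mathlib
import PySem

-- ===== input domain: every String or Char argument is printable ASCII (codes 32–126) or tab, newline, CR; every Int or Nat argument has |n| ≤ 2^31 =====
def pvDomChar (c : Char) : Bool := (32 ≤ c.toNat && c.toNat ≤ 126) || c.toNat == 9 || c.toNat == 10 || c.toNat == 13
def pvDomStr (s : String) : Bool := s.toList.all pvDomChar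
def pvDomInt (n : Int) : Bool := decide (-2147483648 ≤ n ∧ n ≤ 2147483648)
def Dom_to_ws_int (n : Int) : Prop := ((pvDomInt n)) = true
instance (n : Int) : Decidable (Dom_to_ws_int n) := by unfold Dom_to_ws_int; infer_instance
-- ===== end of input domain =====

-- B replaces A's manual divide-by-2 prepend loop with radix conversion (bin) + character relabelling; objective: idiomatic.


-- ===== PORT A =====
-- the while loop: s is the accumulator string being prepended to
def wsLoop (n : Nat) (s : String) : String :=
  if h : n = 0 then s
  else wsLoop (n / 2) ((if n % 2 = 0 then "S" else "T") ++ s)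
  decreasing_by exact Nat.div_lt_self (Nat.pos_of_ne_zero h) (by norm_num)

def to_ws_int (n : Int) : String :=
  if n = 0 then "S\n"
  else (if n > 0 then "S" else "T") ++ wsLoop n.natAbs "" ++ "\n"

-- ===== PORT B =====
-- bin(m): binary digits, built least-significant first then reversed (MSB-first, no leading zeros)
def binDigits (n : Nat) : List Char :=
  if h : n = 0 then []
  else (if n % 2 = 1 then '1' else '0') :: binDigits (n / 2)
  decreasing_by exact Nat.div_lt_self (Nat.pos_of_ne_zero h) (by norm_num)

-- the translation table '1'->'T', '0'->'S'
def wsTr (c : Char) : Char := if c = '1' then 'T' else 'S'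

def to_ws_int_alt (n : Int) : String :=
  if n = 0 then "S\n"
  else (if n > 0 then "S" else "T")
       ++ String.ofList (((binDigits n.natAbs).reverse).map wsTr) ++ "\n"

-- ===== PRECONDITION & SPEC =====
def Spec_to_ws_int (n : Int) (out : String) : Prop := out = to_ws_int_alt n
instance (n : Int) (out : String) : Decidable (Spec_to_ws_int n out) := by unfold Spec_to_ws_int; infer_instance

-- ===== CLAIM (what is proved, stated in full; the proofs are below) =====
def Claim_equal_to_ws_int : Prop := ∀ (n : Int), Dom_to_ws_int n → Spec_to_ws_int n (to_ws_int n)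

-- ===== LEMMAS AND PROOFS =====
theorem wsLoop_eq (n : Nat) (s : String) :
    wsLoop n s = String.ofList ((binDigits n).reverse.map wsTr) ++ s := by
  induction n using Nat.strong_induction_on generalizing s with
  | _ n ih =>
    by_cases h : n = 0
    · subst h
      simp [wsLoop, binDigits]
    · rw [wsLoop, binDigits]
      simp only [h, dif_neg, not_false_iff]
      rw [ih (n / 2) (Nat.div_lt_self (Nat.pos_of_ne_zero h) (by norm_num))]
      have hmod : n % 2 = 0 ∨ n % 2 = 1 := Nat.mod_two_eq_zero_or_one n
      rcases hmod with hm | hm <;>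
        simp [hm, wsTr, ← String.append_assoc]

-- ===== VERDICT (by name: the statement is the Claim_ definition above) =====
theorem to_ws_int_spec : Claim_equal_to_ws_int := by
  intro n _
  unfold Spec_to_ws_int to_ws_int to_ws_int_alt
  by_cases h : n = 0
  · simp [h]
  · simp only [h, if_false]
    rw [wsLoop_eq]
    simp [String.append_assoc]
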